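-- pv_equiv track=rewrite | github.com/TheSamurai4861/movi-app | scripts/outline_and_export.py | parse_select_ranges
-- ===== SOURCE A (Python) =====
-- def parse_select_ranges(sel: str, max_n: int) -> list[int]:
--     selected = set()
--     for part in sel.split(","):
--         part = part.strip()
--         if not part:
--             continue
--         if "-" in part:
--             a, b = part.split("-", 1)
--             try:
--                 start = int(a); end = int(b)
--             except ValueError:
--                 continue
--             if start > end:
--                 start, end = end, start
--             for x in range(max(1, start), min(max_n, end) + 1):
--                 selected.add(x)
--         else:
--             try:
--                 x = int(part)
--             except ValueError:
--                 continue
--             if 1 <= x <= max_n: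
--                 selected.add(x)
--     return sorted(selected)
-- ===== SOURCE B (Python) =====
-- def parse_select_ranges(sel: str, max_n: int) -> list[int]:
--     intervals = []
--     for part in sel.split(","):
--         part = part.strip()
--         if not part:
--             continue
--         if "-" in part:
--             a, b = part.split("-", 1)
--             try:
--                 s = int(a); e = int(b)
--             except ValueError:
--                 continue
--             lo = max(1, min(s, e)); hi = min(max_n, max(s, e))
--             if lo <= hi:
--                 intervals.append((lo, hi))
--         else:
--             try:
--                 x = int(part)
--             except ValueError:
--                 continue
--             if 1 <= x <= max_n:
--                 intervals.append((x, x))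
--     out = []
--     prev = 0
--     for lo, hi in sorted(intervals, key=lambda p: p[0]):
--         lo2 = max(lo, prev + 1)
--         if lo2 <= hi:
--             out.extend(range(lo2, hi + 1))
--             prev = hi
--     return out
-- ===== Notes on version B (the rewrite author's own statement) =====
-- stated objective: alternative
-- what changed: B parses each valid part into a clamped closed interval instead of inserting every selected index into a set, then sorts the intervals by start and emits the result with a single merge-sweep, so no set and no sort of the elements is needed.
import Mathlib
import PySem

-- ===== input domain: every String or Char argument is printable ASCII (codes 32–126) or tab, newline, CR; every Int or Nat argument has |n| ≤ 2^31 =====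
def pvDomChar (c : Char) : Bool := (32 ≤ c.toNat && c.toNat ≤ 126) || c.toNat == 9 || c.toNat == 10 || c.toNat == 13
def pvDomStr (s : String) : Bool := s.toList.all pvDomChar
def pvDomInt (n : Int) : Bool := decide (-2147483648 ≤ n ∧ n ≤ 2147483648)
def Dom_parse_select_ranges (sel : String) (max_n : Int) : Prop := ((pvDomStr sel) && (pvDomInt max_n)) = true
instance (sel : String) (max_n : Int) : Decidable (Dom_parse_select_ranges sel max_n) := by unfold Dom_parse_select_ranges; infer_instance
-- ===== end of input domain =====

-- B replaces A's element-by-element set insertion plus final sort by collecting clamped closed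
-- intervals and emitting the result with a sort-and-sweep merge (objective: alternative algorithm).

-- ===== PORT A =====
-- loop body of A's 'for part in sel.split(",")'
def pvStepA (max_n : Int) (s : PySem.Set Int) (part : String) : PySem.Set Int :=
  let part := PySem.Str.strip part
  if part = "" then s
  else if PySem.Str.isIn "-" part then
    match (PySem.Str.splitMax? part "-" 1).getD [] with
    | [a, b] =>
      match PySem.Int.ofStr? a, PySem.Int.ofStr? b with
      | some start, some stop =>
        let p := if start > stop then (stop, start) else (start, stop)
        (PySem.List.pyRange (max 1 p.1) (min max_n p.2 + 1) 1).foldl PySem.Set.add s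
      | _, _ => s
    | _ => s
  else
    match PySem.Int.ofStr? part with
    | some x => if 1 ≤ x ∧ x ≤ max_n then PySem.Set.add s x else s
    | none => s

def parse_select_ranges (sel : String) (max_n : Int) : List Int :=
  PySem.List.sorted
    (((PySem.Str.split? sel ",").getD []).foldl (pvStepA max_n) PySem.Set.empty)
    (fun x => x) false

-- ===== PORT B =====
-- loop body of B's parsing loop: each valid part becomes one clamped, non-empty closed interval
def pvStepB (max_n : Int) (acc : List (Int × Int)) (part : String) : List (Int × Int) :=
  let part := PySem.Str.strip part
  if part = "" then acc
  else if PySem.Str.isIn "-" part then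
    match (PySem.Str.splitMax? part "-" 1).getD [] with
    | [a, b] =>
      match PySem.Int.ofStr? a, PySem.Int.ofStr? b with
      | some s, some e =>
        let lo := max 1 (min s e)
        let hi := min max_n (max s e)
        if lo ≤ hi then acc ++ [(lo, hi)] else acc
      | _, _ => acc
    | _ => acc
  else
    match PySem.Int.ofStr? part with
    | some x => if 1 ≤ x ∧ x ≤ max_n then acc ++ [(x, x)] else acc
    | none => acc

-- loop body of B's sweep over the sorted intervals: state = (out, prev)
def pvEmit (st : List Int × Int) (p : Int × Int) : List Int × Int :=
  let lo2 := max p.1 (st.2 + 1)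
  if lo2 ≤ p.2 then (st.1 ++ PySem.List.pyRange lo2 (p.2 + 1) 1, p.2) else st

def parse_select_ranges_alt (sel : String) (max_n : Int) : List Int :=
  let intervals := ((PySem.Str.split? sel ",").getD []).foldl (pvStepB max_n) []
  ((PySem.List.sorted intervals (fun p => p.1) false).foldl pvEmit ([], 0)).1

-- ===== PRECONDITION & SPEC =====
def Spec_parse_select_ranges (sel : String) (max_n : Int) (out : List Int) : Prop := out = parse_select_ranges_alt sel max_n
instance (sel : String) (max_n : Int) (out : List Int) : Decidable (Spec_parse_select_ranges sel max_n out) := by unfold Spec_parse_select_ranges; infer_instance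

-- ===== CLAIM (what is proved, stated in full; the proofs are below) =====
def Claim_equal_parse_select_ranges : Prop := ∀ (sel : String) (max_n : Int), Dom_parse_select_ranges sel max_n → Spec_parse_select_ranges sel max_n (parse_select_ranges sel max_n)

-- ===== LEMMAS AND PROOFS =====

-- 'x lies in one of B's intervals'
def pvCovers (I : List (Int × Int)) (x : Int) : Prop := ∃ p ∈ I, p.1 ≤ x ∧ x ≤ p.2

lemma pvCovers_append (I : List (Int × Int)) (q : Int × Int) (x : Int) :
    pvCovers (I ++ [q]) x ↔ pvCovers I x ∨ (q.1 ≤ x ∧ x ≤ q.2) := by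
  simp [pvCovers, or_and_right, exists_or]

-- one parsing iteration preserves the A-set / B-interval correspondence
set_option maxHeartbeats 1000000 in
lemma pv_step_inv (max_n : Int) (part : String) (S : PySem.Set Int) (I : List (Int × Int))
    (hnd : S.Nodup) (hbd : ∀ x ∈ S, 1 ≤ x ∧ x ≤ max_n)
    (hIbd : ∀ q ∈ I, 1 ≤ q.1 ∧ q.1 ≤ q.2 ∧ q.2 ≤ max_n)
    (hmem : ∀ x, 1 ≤ x → x ≤ max_n → (x ∈ S ↔ pvCovers I x)) :
    (pvStepA max_n S part).Nodup ∧ (∀ x ∈ pvStepA max_n S part, 1 ≤ x ∧ x ≤ max_n) ∧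
      (∀ q ∈ pvStepB max_n I part, 1 ≤ q.1 ∧ q.1 ≤ q.2 ∧ q.2 ≤ max_n) ∧
      (∀ x, 1 ≤ x → x ≤ max_n → (x ∈ pvStepA max_n S part ↔ pvCovers (pvStepB max_n I part) x)) := by
  unfold pvStepA pvStepB
  by_cases h0 : PySem.Str.strip part = ""
  · simp only [h0, reduceIte]
    exact ⟨hnd, hbd, hIbd, hmem⟩
  simp only [if_neg h0]
  by_cases h1 : PySem.Str.isIn "-" (PySem.Str.strip part) = true
  · simp only [h1, reduceIte]
    rcases hsp : (PySem.Str.splitMax? (PySem.Str.strip part) "-" 1).getD [] with _ | ⟨a, _ | ⟨b, _ | ⟨c, rest⟩⟩⟩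
    · exact ⟨hnd, hbd, hIbd, hmem⟩
    · exact ⟨hnd, hbd, hIbd, hmem⟩
    · rcases ha : PySem.Int.ofStr? a with _ | s0 <;> rcases hb : PySem.Int.ofStr? b with _ | e0 <;>
        simp only [ha, hb]
      · exact ⟨hnd, hbd, hIbd, hmem⟩
      · exact ⟨hnd, hbd, hIbd, hmem⟩
      · exact ⟨hnd, hbd, hIbd, hmem⟩
      · -- the range branch
        by_cases hss : s0 > e0 <;> simp only [hss, reduceIte] <;>
        · refine ⟨PySem.Set.nodup_update _ _ hnd, ?_, ?_, ?_⟩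
          · intro x hx
            rcases (PySem.Set.mem_update _ _ _).1 hx with h | h
            · exact hbd x h
            · rw [PySem.List.mem_pyRange_one] at h
              constructor <;> omega
          · by_cases hle : max 1 (min s0 e0) ≤ min max_n (max s0 e0)
            · rw [if_pos hle]
              intro q hq
              rcases List.mem_append.1 hq with h | h
              · exact hIbd q h
              · rcases List.mem_singleton.1 h with rfl
                refine ⟨by omega, by omega, by omega⟩
            · rw [if_neg hle]; exact hIbd
          · intro x hx1 hx2
            rw [show ∀ r, List.foldl PySem.Set.add S r = PySem.Set.update S r from fun _ => rfl,
                PySem.Set.mem_update, PySem.List.mem_pyRange_one, hmem x hx1 hx2]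
            by_cases hle : max 1 (min s0 e0) ≤ min max_n (max s0 e0)
            · rw [if_pos hle, pvCovers_append]
              exact or_congr Iff.rfl (by omega)
            · rw [if_neg hle]
              exact ⟨fun h => h.resolve_right (by omega), Or.inl⟩
    · exact ⟨hnd, hbd, hIbd, hmem⟩
  · rw [Bool.not_eq_true] at h1
    simp only [h1, Bool.false_eq_true, reduceIte]
    rcases hx0 : PySem.Int.ofStr? (PySem.Str.strip part) with _ | x0
    · exact ⟨hnd, hbd, hIbd, hmem⟩
    · have key : (if 1 ≤ x0 ∧ x0 ≤ max_n then S.add x0 else S).Nodup ∧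
          (∀ x ∈ (if 1 ≤ x0 ∧ x0 ≤ max_n then S.add x0 else S), 1 ≤ x ∧ x ≤ max_n) ∧
          (∀ q ∈ (if 1 ≤ x0 ∧ x0 ≤ max_n then I ++ [(x0, x0)] else I), 1 ≤ q.1 ∧ q.1 ≤ q.2 ∧ q.2 ≤ max_n) ∧
          (∀ x, 1 ≤ x → x ≤ max_n →
            ((x ∈ (if 1 ≤ x0 ∧ x0 ≤ max_n then S.add x0 else S)) ↔
              pvCovers (if 1 ≤ x0 ∧ x0 ≤ max_n then I ++ [(x0, x0)] else I) x)) := by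
        by_cases hc : 1 ≤ x0 ∧ x0 ≤ max_n
        · simp only [if_pos hc]
          refine ⟨PySem.Set.nodup_add _ _ hnd, ?_, ?_, ?_⟩
          · intro x hx
            rcases (PySem.Set.mem_add _ _ _).1 hx with h | h
            · exact hbd x h
            · subst h; exact hc
          · intro q hq
            rcases List.mem_append.1 hq with h | h
            · exact hIbd q h
            · rcases List.mem_singleton.1 h with rfl
              exact ⟨hc.1, le_refl _, hc.2⟩
          · intro x hx1 hx2
            rw [PySem.Set.mem_add, pvCovers_append, hmem x hx1 hx2]
            exact or_congr Iff.rfl (by constructor <;> intro h <;> omega)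
        · simp only [if_neg hc]
          exact ⟨hnd, hbd, hIbd, hmem⟩
      exact key

-- the whole parsing loop preserves it
lemma pv_fold_inv (max_n : Int) (parts : List String) (S : PySem.Set Int) (I : List (Int × Int))
    (hnd : S.Nodup) (hbd : ∀ x ∈ S, 1 ≤ x ∧ x ≤ max_n)
    (hIbd : ∀ q ∈ I, 1 ≤ q.1 ∧ q.1 ≤ q.2 ∧ q.2 ≤ max_n)
    (hmem : ∀ x, 1 ≤ x → x ≤ max_n → (x ∈ S ↔ pvCovers I x)) :
    (parts.foldl (pvStepA max_n) S).Nodup ∧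
      (∀ x ∈ parts.foldl (pvStepA max_n) S, 1 ≤ x ∧ x ≤ max_n) ∧
      (∀ q ∈ parts.foldl (pvStepB max_n) I, 1 ≤ q.1 ∧ q.1 ≤ q.2 ∧ q.2 ≤ max_n) ∧
      (∀ x, 1 ≤ x → x ≤ max_n →
        (x ∈ parts.foldl (pvStepA max_n) S ↔ pvCovers (parts.foldl (pvStepB max_n) I) x)) := by
  induction parts generalizing S I with
  | nil => exact ⟨hnd, hbd, hIbd, hmem⟩
  | cons part rest ih =>
    obtain ⟨h1, h2, h3, h4⟩ := pv_step_inv max_n part S I hnd hbd hIbd hmem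
    exact ih _ _ h1 h2 h3 h4

lemma pvEmit_eq (st : List Int × Int) (p : Int × Int) :
    pvEmit st p = if max p.1 (st.2 + 1) ≤ p.2
      then (st.1 ++ PySem.List.pyRange (max p.1 (st.2 + 1)) (p.2 + 1) 1, p.2) else st := rfl

-- the sweep over the sorted interval list emits exactly the covered integers, in increasing order
lemma pv_emit_inv (ivs : List (Int × Int)) (out : List Int) (prev : Int)
    (hsort : ivs.Pairwise (fun a b => a.1 ≤ b.1))
    (hlo1 : ∀ q ∈ ivs, 1 ≤ q.1)
    (hw : (prev = 0 ∧ out = []) ∨ (∃ l, (∀ x, l ≤ x → x ≤ prev → x ∈ out) ∧ ∀ q ∈ ivs, l ≤ q.1))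
    (hout : out.Pairwise (· < ·))
    (hub : ∀ x ∈ out, x ≤ prev) :
    (ivs.foldl pvEmit (out, prev)).1.Pairwise (· < ·) ∧
      (∀ x, x ∈ (ivs.foldl pvEmit (out, prev)).1 ↔ x ∈ out ∨ pvCovers ivs x) := by
  induction ivs generalizing out prev with
  | nil =>
    refine ⟨hout, ?_⟩
    intro x; simp [pvCovers]
  | cons q rest ih =>
    obtain ⟨hq1, hsort'⟩ := List.pairwise_cons.1 hsort
    have hq1' : 1 ≤ q.1 := hlo1 q (List.mem_cons_self ..)
    simp only [List.foldl_cons, pvEmit_eq]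
    by_cases hle : max q.1 (prev + 1) ≤ q.2
    · rw [if_pos hle]
      -- membership of [q.1, q.2] already below prev is in out
      have hold : ∀ x, q.1 ≤ x → x ≤ q.2 → x < max q.1 (prev + 1) → x ∈ out := by
        intro x h1 h2 h3
        rcases hw with ⟨hp, ho⟩ | ⟨l, hl, hr⟩
        · omega
        · exact hl x (le_trans (hr q (List.mem_cons_self ..)) h1) (by omega)
      have hub' : ∀ x ∈ out ++ PySem.List.pyRange (max q.1 (prev + 1)) (q.2 + 1) 1, x ≤ q.2 := by
        intro x hx
        rcases List.mem_append.1 hx with h | h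
        · have := hub x h; omega
        · rw [PySem.List.mem_pyRange_one] at h; omega
      obtain ⟨p1, p2⟩ := ih (out ++ PySem.List.pyRange (max q.1 (prev + 1)) (q.2 + 1) 1) q.2
        hsort' (fun r hr => hlo1 r (List.mem_cons_of_mem _ hr))
        (Or.inr ⟨q.1, fun x h1 h2 => by
          rcases lt_or_ge x (max q.1 (prev + 1)) with h | h
          · exact List.mem_append.2 (Or.inl (hold x h1 h2 h))
          · exact List.mem_append.2 (Or.inr ((PySem.List.mem_pyRange_one).2 ⟨h, by omega⟩)), hq1⟩)
        (List.pairwise_append.2 ⟨hout, (PySem.List.pairwise_lt_pyRange_one _ _), by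
          intro x hx y hy
          have := hub x hx
          rw [PySem.List.mem_pyRange_one] at hy
          omega⟩)
        hub'
      refine ⟨p1, ?_⟩
      intro x
      rw [p2 x, List.mem_append, PySem.List.mem_pyRange_one]
      constructor
      · rintro ((h | h) | h)
        · exact Or.inl h
        · exact Or.inr ⟨q, List.mem_cons_self .., by omega⟩
        · obtain ⟨p, hp, hb⟩ := h
          exact Or.inr ⟨p, List.mem_cons_of_mem _ hp, hb⟩
      · rintro (h | ⟨p, hp, hb⟩)
        · exact Or.inl (Or.inl h)
        · rcases List.mem_cons.1 hp with rfl | hp'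
          · rcases lt_or_ge x (max p.1 (prev + 1)) with h | h
            · exact Or.inl (Or.inl (hold x hb.1 hb.2 h))
            · exact Or.inl (Or.inr ⟨h, by omega⟩)
          · exact Or.inr ⟨p, hp', hb⟩
    · rw [if_neg hle]
      -- the interval q is entirely below prev (or empty): everything it covers is already in out
      have hcov : ∀ x, q.1 ≤ x → x ≤ q.2 → x ∈ out := by
        intro x h1 h2
        rcases hw with ⟨hp, ho⟩ | ⟨l, hl, hr⟩
        · omega
        · exact hl x (le_trans (hr q (List.mem_cons_self ..)) h1) (by omega)
      have hw' : (prev = 0 ∧ out = []) ∨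
          (∃ l, (∀ x, l ≤ x → x ≤ prev → x ∈ out) ∧ ∀ r ∈ rest, l ≤ r.1) := by
        rcases hw with ⟨hp, ho⟩ | ⟨l, hl, hr⟩
        · exact Or.inl ⟨hp, ho⟩
        · exact Or.inr ⟨l, hl, fun r hr' => hr r (List.mem_cons_of_mem _ hr')⟩
      obtain ⟨p1, p2⟩ := ih out prev hsort' (fun r hr => hlo1 r (List.mem_cons_of_mem _ hr)) hw' hout hub
      refine ⟨p1, ?_⟩
      intro x
      rw [p2 x]
      constructor
      · rintro (h | ⟨p, hp, hb⟩)
        · exact Or.inl h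
        · exact Or.inr ⟨p, List.mem_cons_of_mem _ hp, hb⟩
      · rintro (h | ⟨p, hp, hb⟩)
        · exact Or.inl h
        · rcases List.mem_cons.1 hp with rfl | hp'
          · exact Or.inl (hcov x hb.1 hb.2)
          · exact Or.inr ⟨p, hp', hb⟩

-- ===== VERDICT (by name: the statement is the Claim_ definition above) =====
theorem parse_select_ranges_spec : Claim_equal_parse_select_ranges := by
  intro sel max_n _
  unfold Spec_parse_select_ranges parse_select_ranges parse_select_ranges_alt
  obtain ⟨hnd, hbd, hIbd, hmem⟩ := pv_fold_inv max_n ((PySem.Str.split? sel ",").getD [])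
    PySem.Set.empty [] (by simp [PySem.Set.empty]) (by simp [PySem.Set.empty])
    (by simp) (by intro x _ _; simp [PySem.Set.empty, pvCovers])
  set I := ((PySem.Str.split? sel ",").getD []).foldl (pvStepB max_n) [] with hI
  set J := PySem.List.sorted I (fun p => p.1) false with hJ
  have hJmem : ∀ q, q ∈ J ↔ q ∈ I := fun q => PySem.List.mem_sorted I (fun p => p.1) false q
  obtain ⟨p1, p2⟩ := pv_emit_inv J [] 0
    (PySem.List.sorted_pairwise I (fun p => p.1))
    (fun q hq => ((hIbd q ((hJmem q).1 hq)).1))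
    (Or.inl ⟨rfl, rfl⟩) List.Pairwise.nil (by simp)
  apply PySem.List.sorted_eq_of_perm_of_pairwise_lt
  · rw [List.perm_ext_iff_of_nodup (p1.imp (fun h => ne_of_lt h)) hnd]
    intro x
    rw [p2 x]
    constructor
    · rintro (h | ⟨p, hp, hb⟩)
      · exact absurd h (List.not_mem_nil)
      · have hq := hIbd p ((hJmem p).1 hp)
        exact (hmem x (by omega) (by omega)).2 ⟨p, (hJmem p).1 hp, hb⟩
    · intro hx
      obtain ⟨h1, h2⟩ := hbd x hx
      obtain ⟨p, hp, hb⟩ := (hmem x h1 h2).1 hx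
      exact Or.inr ⟨p, (hJmem p).2 hp, hb⟩
  · exact p1
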